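-- pv_equiv track=rewrite | github.com/PulkitGoel123/IITBHU_NLP_OCR_LIBRARY | Fused_Word_Seperation/fusedcharsep.py | generate_CHP
-- ===== SOURCE A (Python) =====
-- def generate_CHP(lobs,l1,l2,w1,w2):
--     CHP = []
--     for i in range(l1,l2+1):
--         CHP.append(0)
--         for j in range(w1,w2+1):
--             if lobs[i][j] :
--                 CHP[-1]+=1
--                 break
--     i = 0
--     while(i<len(CHP) and CHP[i]==0):
--         i+=1
--     R1 = i
--     while(i<len(CHP) and CHP[i]==1):
--         i+=1
--     R2 = i
--     while(i<len(CHP) and CHP[i]==0):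
--         i+=1
--     R3 = i
--     CHP_height = R2-R1
--     return CHP,R1,R2,R3,CHP_height
-- ===== SOURCE B (Python) =====
-- def generate_CHP(lobs, l1, l2, w1, w2):
--     # one comprehension for the profile, then a single state-machine pass
--     # instead of three separate while-scans
--     CHP = [1 if any(lobs[i][j] for j in range(w1, w2 + 1)) else 0
--            for i in range(l1, l2 + 1)]
--     n = len(CHP)
--     phase, R1, R2, R3 = 0, n, n, n
--     k = 0
--     for b in CHP:
--         if phase == 0 and b:
--             R1, phase = k, 1
--         elif phase == 1 and not b:
--             R2, phase = k, 2
--         elif phase == 2 and b: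
--             R3, phase = k, 3
--         k += 1
--     return CHP, R1, R2, R3, R2 - R1
-- ===== Notes on version B (the rewrite author's own statement) =====
-- stated objective: simpler
-- what changed: The build-then-three-while-scans structure is replaced by a comprehension computing the occupancy profile plus a single state-machine pass that captures R1,R2,R3 at the phase transitions, with all boundaries defaulting to the row count.
import Mathlib
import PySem

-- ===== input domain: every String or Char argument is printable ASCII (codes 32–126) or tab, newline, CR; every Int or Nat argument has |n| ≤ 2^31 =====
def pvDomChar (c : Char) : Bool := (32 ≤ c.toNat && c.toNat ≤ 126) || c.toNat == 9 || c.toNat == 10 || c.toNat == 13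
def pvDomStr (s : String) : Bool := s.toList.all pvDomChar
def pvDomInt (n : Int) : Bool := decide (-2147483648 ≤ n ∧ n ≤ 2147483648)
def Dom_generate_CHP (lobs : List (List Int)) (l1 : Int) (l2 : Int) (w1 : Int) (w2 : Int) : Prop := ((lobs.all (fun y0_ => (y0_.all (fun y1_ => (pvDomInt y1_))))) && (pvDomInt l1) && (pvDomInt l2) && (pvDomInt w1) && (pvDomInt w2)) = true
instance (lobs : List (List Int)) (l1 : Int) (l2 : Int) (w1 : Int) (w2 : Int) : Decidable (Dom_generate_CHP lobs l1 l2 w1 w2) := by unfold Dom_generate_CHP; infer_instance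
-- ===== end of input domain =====

-- B replaces A's build-then-three-while-scans by one profile comprehension and a single
-- state-machine pass capturing the region boundaries (objective: simpler).

-- ===== PORT A =====
-- inner for-loop of A: CHP.append(0); for j: if lobs[i][j]: CHP[-1]+=1; break
def pvRowA (row : List Int) : List Int → Int
  | [] => 0
  | j :: rest => if PySem.List.pyGetD row j 0 ≠ 0 then 1 else pvRowA row rest

-- while(i<len(CHP) and CHP[i]==v): i+=1
def pvWhileEq (chp : List Int) (v : Int) (i : Nat) : Nat :=
  if h : i < chp.length ∧ chp.getD i 0 = v then pvWhileEq chp v (i + 1) else i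
termination_by chp.length - i
decreasing_by omega

def generate_CHP (lobs : List (List Int)) (l1 : Int) (l2 : Int) (w1 : Int) (w2 : Int) : List Int × Int × Int × Int × Int :=
  let CHP := (PySem.List.pyRange l1 (l2 + 1) 1).foldl
      (fun acc i => acc ++ [pvRowA ((PySem.List.pyGet? lobs i).getD []) (PySem.List.pyRange w1 (w2 + 1) 1)]) []
  let r1 := pvWhileEq CHP 0 0
  let r2 := pvWhileEq CHP 1 r1
  let r3 := pvWhileEq CHP 0 r2
  (CHP, (r1 : Int), (r2 : Int), (r3 : Int), (r2 : Int) - (r1 : Int))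

-- ===== PORT B =====
-- 1 if any(lobs[i][j] for j in range(w1, w2+1)) else 0
def pvBit (lobs : List (List Int)) (w1 : Int) (w2 : Int) (i : Int) : Int :=
  if (PySem.List.pyRange w1 (w2 + 1) 1).any
      (fun j => decide (PySem.List.pyGetD ((PySem.List.pyGet? lobs i).getD []) j 0 ≠ 0)) then 1 else 0

-- body of B's single for-loop; state = (phase, R1, R2, R3, k)
def pvStep (st : Int × Int × Int × Int × Int) (b : Int) : Int × Int × Int × Int × Int :=
  match st with
  | (phase, R1, R2, R3, k) =>
    if phase = 0 ∧ b ≠ 0 then (1, k, R2, R3, k + 1)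
    else if phase = 1 ∧ b = 0 then (2, R1, k, R3, k + 1)
    else if phase = 2 ∧ b ≠ 0 then (3, R1, R2, k, k + 1)
    else (phase, R1, R2, R3, k + 1)

def generate_CHP_alt (lobs : List (List Int)) (l1 : Int) (l2 : Int) (w1 : Int) (w2 : Int) : List Int × Int × Int × Int × Int :=
  let CHP := (PySem.List.pyRange l1 (l2 + 1) 1).map (pvBit lobs w1 w2)
  let n : Int := CHP.length
  let s := CHP.foldl pvStep (0, n, n, n, 0)
  (CHP, s.2.1, s.2.2.1, s.2.2.2.1, s.2.2.1 - s.2.1)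

-- ===== PRECONDITION & SPEC =====
-- Pre_ = exactly the inputs where Python A raises no IndexError, in bounded closed form:
-- either a loop range is empty, or every visited row index is in range and each row's scan
-- (columns w1.. while entries are zero) ends by the break, the range end, or the row end in range.
def pvRowOk (row : List Int) (w1 : Int) (w2 : Int) : Prop :=
  w2 < w1 ∨ (-(row.length : Int) ≤ w1 ∧ w1 < row.length ∧
    (w2 < row.length ∨ ∃ j ∈ PySem.List.pyRange w1 row.length 1, PySem.List.pyGetD row j 0 ≠ 0))

def Pre_generate_CHP (lobs : List (List Int)) (l1 : Int) (l2 : Int) (w1 : Int) (w2 : Int) : Prop :=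
  l2 < l1 ∨ w2 < w1 ∨
    (-(lobs.length : Int) ≤ l1 ∧ l2 < lobs.length ∧
     ∀ i ∈ PySem.List.pyRange l1 (l2 + 1) 1, pvRowOk ((PySem.List.pyGet? lobs i).getD []) w1 w2)
instance (lobs : List (List Int)) (l1 : Int) (l2 : Int) (w1 : Int) (w2 : Int) : Decidable (Pre_generate_CHP lobs l1 l2 w1 w2) := by unfold Pre_generate_CHP pvRowOk; infer_instance

def pvWitness_generate_CHP : List (List Int) × Int × Int × Int × Int := ([[0], [1], [0]], 0, 2, 0, 0)

def Spec_generate_CHP (lobs : List (List Int)) (l1 : Int) (l2 : Int) (w1 : Int) (w2 : Int) (out : List Int × Int × Int × Int × Int) : Prop := out = generate_CHP_alt lobs l1 l2 w1 w2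
instance (lobs : List (List Int)) (l1 : Int) (l2 : Int) (w1 : Int) (w2 : Int) (out : List Int × Int × Int × Int × Int) : Decidable (Spec_generate_CHP lobs l1 l2 w1 w2 out) := by unfold Spec_generate_CHP; infer_instance

-- ===== CLAIM (what is proved, stated in full; the proofs are below) =====
def Claim_equal_generate_CHP : Prop := ∀ (lobs : List (List Int)) (l1 : Int) (l2 : Int) (w1 : Int) (w2 : Int), Dom_generate_CHP lobs l1 l2 w1 w2 → Pre_generate_CHP lobs l1 l2 w1 w2 → Spec_generate_CHP lobs l1 l2 w1 w2 (generate_CHP lobs l1 l2 w1 w2)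

-- ===== LEMMAS AND PROOFS =====

-- length of the prefix of entries equal to v
def pvLead (v : Int) : List Int → Nat
  | [] => 0
  | x :: xs => if x = v then pvLead v xs + 1 else 0

theorem pvLead_le (v : Int) (l : List Int) : pvLead v l ≤ l.length := by
  induction l with
  | nil => simp [pvLead]
  | cons x xs ih => simp only [pvLead, List.length_cons]; split <;> omega

theorem pvLead_lt_ne (v : Int) (l : List Int) (h : pvLead v l < l.length) :
    l[pvLead v l]'h ≠ v := by
  induction l with
  | nil => simp at h
  | cons x xs ih =>
    by_cases hx : x = v
    · have hl : pvLead v (x :: xs) = pvLead v xs + 1 := by simp [pvLead, hx]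
      simp only [hl] at h ⊢
      simpa using ih (by simpa using h)
    · have hl : pvLead v (x :: xs) = 0 := by simp [pvLead, hx]
      simp [hl, hx]

theorem pvWhileEq_eq (chp : List Int) (v : Int) (i : Nat) (hi : i ≤ chp.length) :
    pvWhileEq chp v i = i + pvLead v (chp.drop i) := by
  generalize hn : chp.length - i = n
  induction n generalizing i with
  | zero =>
    have hlen : i = chp.length := by omega
    unfold pvWhileEq
    rw [dif_neg (by omega)]
    simp [hlen, pvLead]
  | succ n ih =>
    have hlt : i < chp.length := by omega
    have hdrop := List.drop_eq_getElem_cons hlt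
    unfold pvWhileEq
    by_cases h : chp.getD i 0 = v
    · rw [dif_pos ⟨hlt, h⟩, ih (i + 1) (by omega) (by omega)]
      have hv : chp[i] = v := by rw [← List.getD_eq_getElem chp 0 hlt]; exact h
      rw [hdrop, hv]
      simp [pvLead]
      omega
    · rw [dif_neg (by tauto)]
      have hv : chp[i] ≠ v := by rw [← List.getD_eq_getElem chp 0 hlt]; exact h
      rw [hdrop]
      simp [pvLead, hv]

theorem pvRowA_eq (row : List Int) (js : List Int) :
    pvRowA row js = if js.any (fun j => decide (PySem.List.pyGetD row j 0 ≠ 0)) then 1 else 0 := by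
  induction js with
  | nil => simp [pvRowA]
  | cons j rest ih =>
    by_cases h : PySem.List.pyGetD row j 0 ≠ 0
    · simp [pvRowA, h]
    · simp [pvRowA, h, ih]

-- phase-3 state is absorbing (only k advances)
theorem pvFold3 (bits : List Int) : ∀ (R1 R2 R3 k : Int),
    bits.foldl pvStep (3, R1, R2, R3, k) = (3, R1, R2, R3, k + bits.length) := by
  induction bits with
  | nil => intro R1 R2 R3 k; simp
  | cons b rest ih =>
    intro R1 R2 R3 k
    simp only [List.foldl_cons, pvStep]
    norm_num
    rw [ih]
    simp only [Prod.mk.injEq, true_and]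
    ring

theorem pvFold0_all (bits : List Int) : ∀ (A B C k : Int), pvLead 0 bits = bits.length →
    bits.foldl pvStep (0, A, B, C, k) = (0, A, B, C, k + bits.length) := by
  induction bits with
  | nil => intro A B C k _; simp
  | cons b rest ih =>
    intro A B C k h
    by_cases hb : b = 0
    · subst hb
      have hlead : pvLead 0 ((0 : Int) :: rest) = pvLead 0 rest + 1 := by simp [pvLead]
      simp only [hlead, List.length_cons] at h
      have hstep : pvStep ((0 : Int), A, B, C, k) 0 = (0, A, B, C, k + 1) := by
        simp [pvStep]
      rw [List.foldl_cons, hstep, ih A B C (k + 1) (by omega)]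
      simp only [List.length_cons, Prod.mk.injEq, true_and]
      push_cast; ring
    · simp only [pvLead, if_neg hb, List.length_cons] at h
      have := pvLead_le 0 rest
      omega

theorem pvFold0_red (bits : List Int) : ∀ (A B C k : Int), pvLead 0 bits < bits.length →
    bits.foldl pvStep (0, A, B, C, k) =
      (bits.drop (pvLead 0 bits + 1)).foldl pvStep
        (1, k + pvLead 0 bits, B, C, k + pvLead 0 bits + 1) := by
  induction bits with
  | nil => intro A B C k h; simp at h
  | cons b rest ih =>
    intro A B C k h
    by_cases hb : b = 0
    · subst hb
      have hlead : pvLead 0 ((0 : Int) :: rest) = pvLead 0 rest + 1 := by simp [pvLead]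
      simp only [hlead, List.length_cons] at h
      have hstep : pvStep ((0 : Int), A, B, C, k) 0 = (0, A, B, C, k + 1) := by
        simp [pvStep]
      rw [List.foldl_cons, hstep, ih A B C (k + 1) (by omega), hlead,
        List.drop_succ_cons]
      congr 1
      simp only [Prod.mk.injEq, true_and]
      constructor <;> (push_cast; ring)
    · have hlead : pvLead 0 (b :: rest) = 0 := by simp [pvLead, hb]
      have hb' : b ≠ 0 := hb
      have hstep : pvStep ((0 : Int), A, B, C, k) b = (1, k, B, C, k + 1) := by
        simp [pvStep, hb']
      rw [List.foldl_cons, hstep, hlead, List.drop_succ_cons]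
      simp

theorem pvFold1_all (bits : List Int) : ∀ (A B C k : Int), (∀ b ∈ bits, b = 0 ∨ b = 1) →
     pvLead 1 bits = bits.length →
    bits.foldl pvStep (1, A, B, C, k) = (1, A, B, C, k + bits.length) := by
  induction bits with
  | nil => intro A B C k _ _; simp
  | cons b rest ih =>
    intro A B C k h01 h
    by_cases hb : b = 1
    · subst hb
      have hlead : pvLead 1 ((1 : Int) :: rest) = pvLead 1 rest + 1 := by simp [pvLead]
      simp only [hlead, List.length_cons] at h
      have hstep : pvStep ((1 : Int), A, B, C, k) 1 = (1, A, B, C, k + 1) := by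
        simp [pvStep]
      rw [List.foldl_cons, hstep, ih A B C (k + 1) (fun x hx => h01 x (List.mem_cons_of_mem _ hx)) (by omega)]
      simp only [List.length_cons, Prod.mk.injEq, true_and]
      push_cast; ring
    · simp only [pvLead, if_neg hb, List.length_cons] at h
      have := pvLead_le 1 rest
      omega

theorem pvFold1_red (bits : List Int) : ∀ (A B C k : Int), (∀ b ∈ bits, b = 0 ∨ b = 1) →
     pvLead 1 bits < bits.length →
    bits.foldl pvStep (1, A, B, C, k) =
      (bits.drop (pvLead 1 bits + 1)).foldl pvStep
        (2, A, k + pvLead 1 bits, C, k + pvLead 1 bits + 1) := by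
  induction bits with
  | nil => intro A B C k _ h; simp at h
  | cons b rest ih =>
    intro A B C k h01 h
    by_cases hb : b = 1
    · subst hb
      have hlead : pvLead 1 ((1 : Int) :: rest) = pvLead 1 rest + 1 := by simp [pvLead]
      simp only [hlead, List.length_cons] at h
      have hstep : pvStep ((1 : Int), A, B, C, k) 1 = (1, A, B, C, k + 1) := by
        simp [pvStep]
      rw [List.foldl_cons, hstep, ih A B C (k + 1) (fun x hx => h01 x (List.mem_cons_of_mem _ hx)) (by omega), hlead,
        List.drop_succ_cons]
      congr 1
      simp only [Prod.mk.injEq, true_and]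
      constructor <;> (push_cast; ring)
    · have hlead : pvLead 1 (b :: rest) = 0 := by simp [pvLead, hb]
      have hb0 : b = 0 := by
        rcases h01 b List.mem_cons_self with h0 | h1
        · exact h0
        · exact absurd h1 hb
      subst hb0
      have hstep : pvStep ((1 : Int), A, B, C, k) 0 = (2, A, k, C, k + 1) := by
        simp [pvStep]
      rw [List.foldl_cons, hstep, hlead, List.drop_succ_cons]
      simp

theorem pvFold2_all (bits : List Int) : ∀ (A B C k : Int), pvLead 0 bits = bits.length →
    bits.foldl pvStep (2, A, B, C, k) = (2, A, B, C, k + bits.length) := by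
  induction bits with
  | nil => intro A B C k _; simp
  | cons b rest ih =>
    intro A B C k h
    by_cases hb : b = 0
    · subst hb
      have hlead : pvLead 0 ((0 : Int) :: rest) = pvLead 0 rest + 1 := by simp [pvLead]
      simp only [hlead, List.length_cons] at h
      have hstep : pvStep ((2 : Int), A, B, C, k) 0 = (2, A, B, C, k + 1) := by
        simp [pvStep]
      rw [List.foldl_cons, hstep, ih A B C (k + 1) (by omega)]
      simp only [List.length_cons, Prod.mk.injEq, true_and]
      push_cast; ring
    · simp only [pvLead, if_neg hb, List.length_cons] at h
      have := pvLead_le 0 rest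
      omega

theorem pvFold2_red (bits : List Int) : ∀ (A B C k : Int), pvLead 0 bits < bits.length →
    bits.foldl pvStep (2, A, B, C, k) =
      (bits.drop (pvLead 0 bits + 1)).foldl pvStep
        (3, A, B, k + pvLead 0 bits, k + pvLead 0 bits + 1) := by
  induction bits with
  | nil => intro A B C k h; simp at h
  | cons b rest ih =>
    intro A B C k h
    by_cases hb : b = 0
    · subst hb
      have hlead : pvLead 0 ((0 : Int) :: rest) = pvLead 0 rest + 1 := by simp [pvLead]
      simp only [hlead, List.length_cons] at h
      have hstep : pvStep ((2 : Int), A, B, C, k) 0 = (2, A, B, C, k + 1) := by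
        simp [pvStep]
      rw [List.foldl_cons, hstep, ih A B C (k + 1) (by omega), hlead,
        List.drop_succ_cons]
      congr 1
      simp only [Prod.mk.injEq, true_and]
      constructor <;> (push_cast; ring)
    · have hlead : pvLead 0 (b :: rest) = 0 := by simp [pvLead, hb]
      have hb' : b ≠ 0 := hb
      have hstep : pvStep ((2 : Int), A, B, C, k) b = (3, A, B, k, k + 1) := by
        simp [pvStep, hb']
      rw [List.foldl_cons, hstep, hlead, List.drop_succ_cons]
      simp


-- combined core fact: the three while-scans of A equal B's state machine on a 0/1 list
theorem pvMain (chp : List Int) (h01 : ∀ b ∈ chp, b = 0 ∨ b = 1) :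
    ((pvWhileEq chp 0 0 : Int), (pvWhileEq chp 1 (pvWhileEq chp 0 0) : Int),
      (pvWhileEq chp 0 (pvWhileEq chp 1 (pvWhileEq chp 0 0)) : Int))
    = ((chp.foldl pvStep (0, (chp.length : Int), (chp.length : Int), (chp.length : Int), 0)).2.1,
       (chp.foldl pvStep (0, (chp.length : Int), (chp.length : Int), (chp.length : Int), 0)).2.2.1,
       (chp.foldl pvStep (0, (chp.length : Int), (chp.length : Int), (chp.length : Int), 0)).2.2.2.1) := by
  have ht0 := pvLead_le 0 chp
  have hr1 : pvWhileEq chp 0 0 = pvLead 0 chp := by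
    rw [pvWhileEq_eq chp 0 0 (Nat.zero_le _)]; simp
  rw [hr1]
  by_cases hc0 : pvLead 0 chp = chp.length
  · -- profile is all zeros
    have hdrop : chp.drop (pvLead 0 chp) = [] := by rw [hc0]; exact List.drop_length
    have hr2 : pvWhileEq chp 1 (pvLead 0 chp) = pvLead 0 chp := by
      rw [pvWhileEq_eq chp 1 _ (by omega), hdrop]; simp [pvLead]
    have hr3 : pvWhileEq chp 0 (pvLead 0 chp) = pvLead 0 chp := by
      rw [pvWhileEq_eq chp 0 _ (by omega), hdrop]; simp [pvLead]
    rw [hr2, hr3, pvFold0_all chp _ _ _ 0 hc0, hc0]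
  · -- R1 found at index t0
    have hlt0 : pvLead 0 chp < chp.length := by omega
    have hb1 : chp[pvLead 0 chp] = 1 := by
      rcases h01 _ (List.getElem_mem hlt0) with h | h
      · exact absurd h (pvLead_lt_ne 0 chp hlt0)
      · exact h
    have hdrop0 : chp.drop (pvLead 0 chp) = 1 :: chp.drop (pvLead 0 chp + 1) := by
      rw [List.drop_eq_getElem_cons hlt0, hb1]
    have h01t1 : ∀ b ∈ chp.drop (pvLead 0 chp + 1), b = 0 ∨ b = 1 :=
      fun b hb => h01 b (List.drop_subset _ _ hb)
    have hlen1 : (chp.drop (pvLead 0 chp + 1)).length = chp.length - (pvLead 0 chp + 1) :=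
      List.length_drop
    have hr2 : pvWhileEq chp 1 (pvLead 0 chp)
        = pvLead 0 chp + 1 + pvLead 1 (chp.drop (pvLead 0 chp + 1)) := by
      rw [pvWhileEq_eq chp 1 _ (by omega), hdrop0]
      simp [pvLead]; omega
    rw [hr2, pvFold0_red chp _ _ _ 0 hlt0]
    have ht1 := pvLead_le 1 (chp.drop (pvLead 0 chp + 1))
    by_cases hc1 : pvLead 1 (chp.drop (pvLead 0 chp + 1)) = (chp.drop (pvLead 0 chp + 1)).length
    · -- rows are zeros then ones to the end
      have hr2L : pvLead 0 chp + 1 + pvLead 1 (chp.drop (pvLead 0 chp + 1)) = chp.length := by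
        omega
      have hr3 : pvWhileEq chp 0 (pvLead 0 chp + 1 + pvLead 1 (chp.drop (pvLead 0 chp + 1)))
          = chp.length := by
        rw [hr2L, pvWhileEq_eq chp 0 _ (le_refl _), List.drop_length]
        simp [pvLead]
      rw [hr3, pvFold1_all _ _ _ _ _ h01t1 hc1]
      simp only [Prod.mk.injEq, and_true]
      push_cast
      omega
    · -- R2 found
      have hlt1 : pvLead 1 (chp.drop (pvLead 0 chp + 1)) < (chp.drop (pvLead 0 chp + 1)).length := by
        omega
      have hidx : pvLead 0 chp + 1 + pvLead 1 (chp.drop (pvLead 0 chp + 1)) < chp.length := by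
        omega
      have hb0 : (chp.drop (pvLead 0 chp + 1))[pvLead 1 (chp.drop (pvLead 0 chp + 1))] = 0 := by
        rcases h01t1 _ (List.getElem_mem hlt1) with h | h
        · exact h
        · exact absurd h (pvLead_lt_ne 1 _ hlt1)
      have hchp0 : chp[pvLead 0 chp + 1 + pvLead 1 (chp.drop (pvLead 0 chp + 1))]'hidx = 0 := by
        rw [List.getElem_drop] at hb0
        exact hb0
      have hdrop1 : chp.drop (pvLead 0 chp + 1 + pvLead 1 (chp.drop (pvLead 0 chp + 1)))
          = 0 :: chp.drop (pvLead 0 chp + 1 + pvLead 1 (chp.drop (pvLead 0 chp + 1)) + 1) := by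
        rw [List.drop_eq_getElem_cons hidx, hchp0]
      have htail2 : (chp.drop (pvLead 0 chp + 1)).drop (pvLead 1 (chp.drop (pvLead 0 chp + 1)) + 1)
          = chp.drop (pvLead 0 chp + 1 + pvLead 1 (chp.drop (pvLead 0 chp + 1)) + 1) := by
        rw [List.drop_drop]
        congr 1
      have hr3 : pvWhileEq chp 0 (pvLead 0 chp + 1 + pvLead 1 (chp.drop (pvLead 0 chp + 1)))
          = pvLead 0 chp + 1 + pvLead 1 (chp.drop (pvLead 0 chp + 1)) + 1
            + pvLead 0 (chp.drop (pvLead 0 chp + 1 + pvLead 1 (chp.drop (pvLead 0 chp + 1)) + 1)) := by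
        rw [pvWhileEq_eq chp 0 _ (by omega), hdrop1]
        simp [pvLead]
        omega
      rw [hr3, pvFold1_red _ _ _ _ _ h01t1 hlt1, htail2]
      have ht2 := pvLead_le 0 (chp.drop (pvLead 0 chp + 1 + pvLead 1 (chp.drop (pvLead 0 chp + 1)) + 1))
      have hlen2 : (chp.drop (pvLead 0 chp + 1 + pvLead 1 (chp.drop (pvLead 0 chp + 1)) + 1)).length
          = chp.length - (pvLead 0 chp + 1 + pvLead 1 (chp.drop (pvLead 0 chp + 1)) + 1) :=
        List.length_drop
      by_cases hc2 : pvLead 0 (chp.drop (pvLead 0 chp + 1 + pvLead 1 (chp.drop (pvLead 0 chp + 1)) + 1))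
          = (chp.drop (pvLead 0 chp + 1 + pvLead 1 (chp.drop (pvLead 0 chp + 1)) + 1)).length
      · rw [pvFold2_all _ _ _ _ _ hc2]
        simp only [Prod.mk.injEq]
        refine ⟨by omega, by push_cast; omega, by push_cast; omega⟩
      · rw [pvFold2_red _ _ _ _ _ (by omega), pvFold3]
        simp only [Prod.mk.injEq]
        refine ⟨by omega, by push_cast; omega, by push_cast; omega⟩

-- ===== VERDICT (by name: the statement is the Claim_ definition above) =====
theorem generate_CHP_spec : Claim_equal_generate_CHP := by
  intro lobs l1 l2 w1 w2 _ _
  simp only [Spec_generate_CHP, generate_CHP, generate_CHP_alt,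
    PySem.List.foldl_append_singleton_eq_map, List.nil_append]
  have hmap : (PySem.List.pyRange l1 (l2 + 1) 1).map
        (fun i => pvRowA ((PySem.List.pyGet? lobs i).getD []) (PySem.List.pyRange w1 (w2 + 1) 1))
      = (PySem.List.pyRange l1 (l2 + 1) 1).map (pvBit lobs w1 w2) := by
    refine List.map_congr_left (fun i _ => ?_)
    rw [pvRowA_eq]; rfl
  rw [hmap]
  have h01 : ∀ b ∈ (PySem.List.pyRange l1 (l2 + 1) 1).map (pvBit lobs w1 w2), b = 0 ∨ b = 1 := by
    intro b hb
    obtain ⟨i, _, hi⟩ := List.mem_map.mp hb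
    unfold pvBit at hi
    split at hi
    · right; omega
    · left; omega
  have h := pvMain ((PySem.List.pyRange l1 (l2 + 1) 1).map (pvBit lobs w1 w2)) h01
  simp only [Prod.mk.injEq] at h
  obtain ⟨h1, h2, h3⟩ := h
  rw [h1, h2, h3]
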